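-- pv_equiv track=rewrite | github.com/lukacu/pixelpipes | pixelpipes/compiler/utilities.py | _insert_minterm
-- ===== SOURCE A (Python) =====
-- def _insert_minterm(minterms, new):
--     (pos2, neg2) = tuple(new)
--
--     for i, (pos1, neg1) in enumerate(minterms):
--         used1 = pos1 | neg1 # Terms used in clause 1
--         used2 = pos2 | neg2 # Terms used in clause 2
--         common = used1 & used2 # All terms used in both clauses
--
--         if used1 == common and used2 == common: # Same variables used
--             if pos1 == pos2: # Same clause
--                 return minterms
--             change = pos1 ^ pos2
--             if len(change) == 1: # We can remove a single independent variable
--                 del minterms[i]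
--                 new = (pos1 - change, neg1 - change)
--                 return _insert_minterm(minterms, new)
--         elif pos1 == (pos2 & pos1) and neg1 == (neg2 & neg1):
--             return minterms # Reduce to clause 1, already merged
--         elif pos2 == (pos2 & pos1) and neg2 == (neg2 & neg1):
--             del minterms[i]
--             return _insert_minterm(minterms, (pos2, neg2)) # Reduce to clause 2
--         # Clause not the same, move to next one
--
--     # Not merged, add to list
--     return minterms + [new]
-- ===== SOURCE B (Python) =====
-- def _scan(minterms, pos2, neg2):
--     """One left-to-right pass: first interaction with (pos2, neg2) decides.
--     Returns ('done', result) or ('again', shrunken_list, replacement_term)."""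
--     for i, (pos1, neg1) in enumerate(minterms):
--         used1 = pos1 | neg1
--         used2 = pos2 | neg2
--         common = used1 & used2
--         if used1 == common and used2 == common:
--             if pos1 == pos2:
--                 return ('done', minterms)
--             change = pos1 ^ pos2
--             if len(change) == 1:
--                 return ('again', minterms[:i] + minterms[i + 1:],
--                         (pos1 - change, neg1 - change))
--         elif pos1 == (pos2 & pos1) and neg1 == (neg2 & neg1):
--             return ('done', minterms)
--         elif pos2 == (pos2 & pos1) and neg2 == (neg2 & neg1):
--             return ('again', minterms[:i] + minterms[i + 1:], (pos2, neg2))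
--     return ('done', minterms + [(pos2, neg2)])
--
--
-- def _insert_minterm(minterms, new):
--     # Worklist loop instead of recursion; never mutates the caller's list.
--     work, cur = list(minterms), tuple(new)
--     while True:
--         verdict = _scan(work, cur[0], cur[1])
--         if verdict[0] == 'done':
--             return verdict[1]
--         work, cur = verdict[1], verdict[2]
-- ===== Notes on version B (the rewrite author's own statement) =====
-- stated objective: alternative
-- what changed: The interleaved tail recursion (del + recursive call inside the scan) is re-decomposed into a pure single-pass scanner returning a done/again verdict plus an outer worklist loop, and B never mutates the caller's list (the return value is unchanged).
import Mathlib
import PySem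

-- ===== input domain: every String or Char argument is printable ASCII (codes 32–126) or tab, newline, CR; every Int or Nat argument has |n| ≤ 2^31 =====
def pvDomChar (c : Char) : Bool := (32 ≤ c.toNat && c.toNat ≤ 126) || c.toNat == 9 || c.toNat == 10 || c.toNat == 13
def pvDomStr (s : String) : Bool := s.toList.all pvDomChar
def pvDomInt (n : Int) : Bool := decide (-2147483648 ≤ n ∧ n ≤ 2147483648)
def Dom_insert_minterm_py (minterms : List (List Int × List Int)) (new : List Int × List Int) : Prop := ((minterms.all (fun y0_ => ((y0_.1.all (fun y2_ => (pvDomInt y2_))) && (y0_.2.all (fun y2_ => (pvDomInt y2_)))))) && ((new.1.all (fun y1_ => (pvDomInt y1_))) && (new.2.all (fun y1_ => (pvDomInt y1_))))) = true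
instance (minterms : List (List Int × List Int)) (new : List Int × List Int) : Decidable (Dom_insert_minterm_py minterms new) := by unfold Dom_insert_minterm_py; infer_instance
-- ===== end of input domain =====

-- B re-decomposes A's interleaved scan-and-recurse into a pure one-pass scanner plus an outer
-- worklist loop (same return value; A mutates its argument via `del`, B does not — the
-- equivalence proved here is about the return value only).

-- ===== PORT A =====
-- A's scan: `pre` is the already-visited prefix, `rest` the part still to scan; the
-- recursive calls after `del minterms[i]` restart with pre = [].
def pvInsAuxA (pre rest : List (List Int × List Int)) (new : List Int × List Int) :
    List (List Int × List Int) :=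
  match rest with
  | [] => pre ++ [new]
  | (pos1, neg1) :: rs =>
    let pos2 := new.1
    let neg2 := new.2
    let used1 := PySem.Set.union pos1 neg1
    let used2 := PySem.Set.union pos2 neg2
    let common := PySem.Set.inter used1 used2
    if PySem.Set.equal used1 common && PySem.Set.equal used2 common then
      if PySem.Set.equal pos1 pos2 then pre ++ (pos1, neg1) :: rs
      else if PySem.Set.len (PySem.Set.symmDiff pos1 pos2) == 1 then
        pvInsAuxA [] (pre ++ rs)
          (PySem.Set.diff pos1 (PySem.Set.symmDiff pos1 pos2),
           PySem.Set.diff neg1 (PySem.Set.symmDiff pos1 pos2))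
      else pvInsAuxA (pre ++ [(pos1, neg1)]) rs new
    else if PySem.Set.equal pos1 (PySem.Set.inter pos2 pos1) &&
            PySem.Set.equal neg1 (PySem.Set.inter neg2 neg1) then
      pre ++ (pos1, neg1) :: rs
    else if PySem.Set.equal pos2 (PySem.Set.inter pos2 pos1) &&
            PySem.Set.equal neg2 (PySem.Set.inter neg2 neg1) then
      pvInsAuxA [] (pre ++ rs) (pos2, neg2)
    else pvInsAuxA (pre ++ [(pos1, neg1)]) rs new
termination_by (pre.length + rest.length, rest.length)
decreasing_by all_goals simp; omega

def insert_minterm_py (minterms : List (List Int × List Int)) (new : List Int × List Int) :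
    List (List Int × List Int) :=
  pvInsAuxA [] minterms new

-- ===== PORT B =====
-- Verdict of one scan pass: ('done', result) or ('again', shrunken list, replacement term).
inductive PvScanRes where
  | done : List (List Int × List Int) → PvScanRes
  | again : List (List Int × List Int) → List Int × List Int → PvScanRes

-- _scan of Source B; `seen` holds minterms[:i] so that minterms[:i] + minterms[i+1:] is seen ++ rs.
def pvScanB (seen rest : List (List Int × List Int)) (pos2 neg2 : List Int) : PvScanRes :=
  match rest with
  | [] => .done (seen ++ [(pos2, neg2)])
  | (pos1, neg1) :: rs =>
    let used1 := PySem.Set.union pos1 neg1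
    let used2 := PySem.Set.union pos2 neg2
    let common := PySem.Set.inter used1 used2
    if PySem.Set.equal used1 common && PySem.Set.equal used2 common then
      if PySem.Set.equal pos1 pos2 then .done (seen ++ (pos1, neg1) :: rs)
      else if PySem.Set.len (PySem.Set.symmDiff pos1 pos2) == 1 then
        .again (seen ++ rs)
          (PySem.Set.diff pos1 (PySem.Set.symmDiff pos1 pos2),
           PySem.Set.diff neg1 (PySem.Set.symmDiff pos1 pos2))
      else pvScanB (seen ++ [(pos1, neg1)]) rs pos2 neg2
    else if PySem.Set.equal pos1 (PySem.Set.inter pos2 pos1) &&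
            PySem.Set.equal neg1 (PySem.Set.inter neg2 neg1) then
      .done (seen ++ (pos1, neg1) :: rs)
    else if PySem.Set.equal pos2 (PySem.Set.inter pos2 pos1) &&
            PySem.Set.equal neg2 (PySem.Set.inter neg2 neg1) then
      .again (seen ++ rs) (pos2, neg2)
    else pvScanB (seen ++ [(pos1, neg1)]) rs pos2 neg2

-- termination fact the loop below cites: an 'again' verdict carries one element fewer
theorem pvScanB_again_length (seen rest : List (List Int × List Int)) (p n : List Int)
    (l : List (List Int × List Int)) (c : List Int × List Int)
    (h : pvScanB seen rest p n = .again l c) : l.length + 1 = seen.length + rest.length := by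
  induction rest generalizing seen with
  | nil => simp [pvScanB] at h
  | cons x rs ih =>
    obtain ⟨pos1, neg1⟩ := x
    rw [pvScanB] at h
    split_ifs at h with h1 h2 h3 h4 h5 <;>
      first
        | (injection h with hl _; subst hl; simp; omega)
        | cases h
        | (have := ih (seen ++ [(pos1, neg1)]) h; simp at this ⊢; omega)

-- the while-True worklist loop of Source B
def pvLoopB (work : List (List Int × List Int)) (cur : List Int × List Int) :
    List (List Int × List Int) :=
  match h : pvScanB [] work cur.1 cur.2 with
  | .done r => r
  | .again l c => pvLoopB l c
termination_by work.length
decreasing_by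
  have := pvScanB_again_length [] work cur.1 cur.2 l c h
  simp at this; omega

def insert_minterm_py_alt (minterms : List (List Int × List Int)) (new : List Int × List Int) :
    List (List Int × List Int) :=
  pvLoopB minterms new

-- ===== PRECONDITION & SPEC =====
def Spec_insert_minterm_py (minterms : List (List Int × List Int)) (new : List Int × List Int) (out : List (List Int × List Int)) : Prop := out = insert_minterm_py_alt minterms new
instance (minterms : List (List Int × List Int)) (new : List Int × List Int) (out : List (List Int × List Int)) : Decidable (Spec_insert_minterm_py minterms new out) := by unfold Spec_insert_minterm_py; infer_instance

-- ===== CLAIM (what is proved, stated in full; the proofs are below) =====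
def Claim_equal_insert_minterm_py : Prop := ∀ (minterms : List (List Int × List Int)) (new : List Int × List Int), Dom_insert_minterm_py minterms new → Spec_insert_minterm_py minterms new (insert_minterm_py minterms new)

-- ===== LEMMAS AND PROOFS =====

-- what the worklist loop does with a scan verdict
def pvDispatch : PvScanRes → List (List Int × List Int)
  | .done r => r
  | .again l c => pvLoopB l c

theorem pvLoopB_eq (work : List (List Int × List Int)) (cur : List Int × List Int) :
    pvLoopB work cur = pvDispatch (pvScanB [] work cur.1 cur.2) := by
  rw [pvLoopB]
  cases hs : pvScanB [] work cur.1 cur.2 <;> simp [pvDispatch]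

-- A's scan-with-restarts equals one pure scan pass followed by the worklist loop.
theorem pv_key (n : Nat) (pre rest : List (List Int × List Int)) (new : List Int × List Int)
    (hn : pre.length + rest.length ≤ n) :
    pvInsAuxA pre rest new = pvDispatch (pvScanB pre rest new.1 new.2) := by
  induction n generalizing pre rest new with
  | zero =>
    have h2 : rest = [] := by cases rest <;> simp_all
    subst h2
    simp [pvInsAuxA, pvScanB, pvDispatch]
  | succ n ihn =>
    induction rest generalizing pre new with
    | nil => simp [pvInsAuxA, pvScanB, pvDispatch]
    | cons x rs ihr =>
      obtain ⟨pos1, neg1⟩ := x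
      rw [pvInsAuxA, pvScanB]
      split_ifs with h1 h2 h3 h4 h5
      · rfl
      · -- merge: drop a variable, restart the loop
        have hlen : ([] : List (List Int × List Int)).length + (pre ++ rs).length ≤ n := by
          simp at hn ⊢; omega
        rw [show pvDispatch (PvScanRes.again (pre ++ rs)
              (PySem.Set.diff pos1 (PySem.Set.symmDiff pos1 new.1),
               PySem.Set.diff neg1 (PySem.Set.symmDiff pos1 new.1))) = pvLoopB (pre ++ rs)
              (PySem.Set.diff pos1 (PySem.Set.symmDiff pos1 new.1),
               PySem.Set.diff neg1 (PySem.Set.symmDiff pos1 new.1)) from rfl]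
        rw [pvLoopB_eq]
        exact ihn [] (pre ++ rs) _ hlen
      · -- same variables but no single-variable change: move on
        exact ihr (pre ++ [(pos1, neg1)]) new (by simp at hn ⊢; omega)
      · rfl
      · -- reduce to clause 2: restart the loop
        have hlen : ([] : List (List Int × List Int)).length + (pre ++ rs).length ≤ n := by
          simp at hn ⊢; omega
        rw [show pvDispatch (PvScanRes.again (pre ++ rs) (new.1, new.2)) =
              pvLoopB (pre ++ rs) (new.1, new.2) from rfl]
        rw [pvLoopB_eq]
        exact ihn [] (pre ++ rs) _ hlen
      · exact ihr (pre ++ [(pos1, neg1)]) new (by simp at hn ⊢; omega)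

-- ===== VERDICT (by name: the statement is the Claim_ definition above) =====
theorem insert_minterm_py_spec : Claim_equal_insert_minterm_py := by
  intro minterms new _
  unfold Spec_insert_minterm_py insert_minterm_py insert_minterm_py_alt
  rw [pv_key minterms.length [] minterms new (by simp), pvLoopB_eq]
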